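-- pv_equiv track=rewrite | github.com/TheAlgorithms/Python | scheduling/fixed_priority_pre_emptive_scheduling.py | calculate_waiting_times
-- ===== SOURCE A (Python) =====
-- def calculate_waiting_times(
--     duration_times: list[int], priorities: list[int]
-- ) -> list[int]:
--     """
--     This function calculates the waiting time of some processes that have a
--     specified duration time and priority.
--         Return: The waiting time for each process.
--     """
--     waiting_times = [0] * len(duration_times)
--     sorted_processes = sorted(enumerate(duration_times), key=lambda x: priorities[x[0]])
--
--     for i in range(1, len(sorted_processes)):
--         process_id, duration_time = sorted_processes[i]
--         waiting_times[process_id] = (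
--             waiting_times[sorted_processes[i - 1][0]] + sorted_processes[i - 1][1]
--         )
--
--     return waiting_times
-- ===== SOURCE B (Python) =====
-- def calculate_waiting_times(
--     duration_times: list[int], priorities: list[int]
-- ) -> list[int]:
--     keys = [priorities[i] for i in range(len(duration_times))]
--     return [
--         sum(
--             d
--             for j, d in enumerate(duration_times)
--             if keys[j] < keys[i] or (keys[j] == keys[i] and j < i)
--         )
--         for i in range(len(duration_times))
--     ]
-- ===== Notes on version B (the rewrite author's own statement) =====
-- stated objective: alternative
-- what changed: B drops the sort entirely: each process's waiting time is computed directly as the sum of durations of all processes that strictly precede it in (priority, index) lexicographic order, via a pairwise comparison comprehension instead of A's sort-then-scan over a partially filled array.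
import Mathlib
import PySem

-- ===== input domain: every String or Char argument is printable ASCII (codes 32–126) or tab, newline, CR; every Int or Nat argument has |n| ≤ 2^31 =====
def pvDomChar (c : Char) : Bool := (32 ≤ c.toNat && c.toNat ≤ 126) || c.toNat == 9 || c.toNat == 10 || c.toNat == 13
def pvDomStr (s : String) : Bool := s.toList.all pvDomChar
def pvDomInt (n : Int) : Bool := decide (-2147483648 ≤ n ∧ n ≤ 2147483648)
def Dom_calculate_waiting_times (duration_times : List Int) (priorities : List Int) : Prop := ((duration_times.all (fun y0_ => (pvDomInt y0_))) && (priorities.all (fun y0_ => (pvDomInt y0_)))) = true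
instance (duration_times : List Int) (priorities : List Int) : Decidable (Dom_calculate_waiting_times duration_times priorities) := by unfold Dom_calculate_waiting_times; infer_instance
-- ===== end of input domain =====

-- B computes each waiting time directly as the sum of durations of the processes that
-- precede it in (priority, index) lexicographic order — no sort (objective: alternative).


-- ===== PORT A =====
-- The sort key 'priorities[x[0]]' is ported as (pyGet? …).getD 0: under Pre_ every
-- enumerate index is in range, so the default is never taken and the port is exact
-- (Python raises IndexError exactly where Pre_ fails). Likewise the in-loop accesses
-- are always in range (indices come from range(1, n) and from enumerate ids < n).
def calculate_waiting_times (duration_times : List Int) (priorities : List Int) : List Int :=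
  let waiting_times := List.replicate duration_times.length (0 : Int)
  let sorted_processes :=
    PySem.List.sorted (PySem.List.enumerate duration_times 0)
      (fun x => (PySem.List.pyGet? priorities x.1).getD 0) false
  (PySem.List.pyRange 1 (sorted_processes.length : Int) 1).foldl
    (fun wt i =>
      let p := (PySem.List.pyGet? sorted_processes i).getD (0, 0)
      let prev := (PySem.List.pyGet? sorted_processes (i - 1)).getD (0, 0)
      PySem.List.pySetD wt p.1 (((PySem.List.pyGet? wt prev.1).getD 0) + prev.2))
    waiting_times

-- ===== PORT B =====
-- 'keys[j]' is ported as pyGetD keys j 0: every access is at 0 ≤ j < len(keys), so the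
-- default is never taken (Python raises IndexError only where Pre_ fails, in keys' build).
def calculate_waiting_times_alt (duration_times : List Int) (priorities : List Int) : List Int :=
  let keys := (PySem.List.pyRange 0 (duration_times.length : Int) 1).map
    (fun i => (PySem.List.pyGet? priorities i).getD 0)
  (PySem.List.pyRange 0 (duration_times.length : Int) 1).map
    (fun i =>
      (((PySem.List.enumerate duration_times 0).filter
          (fun jd =>
            decide (PySem.List.pyGetD keys jd.1 0 < PySem.List.pyGetD keys i 0) ||
            (PySem.List.pyGetD keys jd.1 0 == PySem.List.pyGetD keys i 0 &&
              decide (jd.1 < i)))).map (·.2)).sum)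

-- ===== PRECONDITION & SPEC =====
-- Pre_ excludes exactly the inputs where Python A raises IndexError: a priorities
-- list shorter than duration_times (the sort key indexes priorities by process id).
def Pre_calculate_waiting_times (duration_times : List Int) (priorities : List Int) : Prop :=
  duration_times.length ≤ priorities.length
instance (duration_times : List Int) (priorities : List Int) : Decidable (Pre_calculate_waiting_times duration_times priorities) := by unfold Pre_calculate_waiting_times; infer_instance
def pvWitness_calculate_waiting_times : List Int × List Int := ([3, 2, 1], [2, 1, 3])

def Spec_calculate_waiting_times (duration_times : List Int) (priorities : List Int) (out : List Int) : Prop := out = calculate_waiting_times_alt duration_times priorities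
instance (duration_times : List Int) (priorities : List Int) (out : List Int) : Decidable (Spec_calculate_waiting_times duration_times priorities out) := by unfold Spec_calculate_waiting_times; infer_instance

-- ===== CLAIM (what is proved, stated in full; the proofs are below) =====
def Claim_equal_calculate_waiting_times : Prop := ∀ (duration_times : List Int) (priorities : List Int), Dom_calculate_waiting_times duration_times priorities → Pre_calculate_waiting_times duration_times priorities → Spec_calculate_waiting_times duration_times priorities (calculate_waiting_times duration_times priorities)

-- ===== LEMMAS AND PROOFS =====

-- shorthand for the priority key of process id t, and the strict lexicographic
-- 'comes earlier in A's stable sort' test that B's comprehension uses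
def pvKey (p : List Int) (t : Int) : Int := (PySem.List.pyGet? p t).getD 0

def pvBefore (p : List Int) (j i : Int) : Bool :=
  decide (pvKey p j < pvKey p i) || (pvKey p j == pvKey p i && decide (j < i))

-- A's loop body over a fixed sorted list s, and the whole loop
def pvStepA (s : List (Int × Int)) (wt : List Int) (i : Int) : List Int :=
  let q := (PySem.List.pyGet? s i).getD (0, 0)
  let prev := (PySem.List.pyGet? s (i - 1)).getD (0, 0)
  PySem.List.pySetD wt q.1 (((PySem.List.pyGet? wt prev.1).getD 0) + prev.2)

def pvA (n : Nat) (s : List (Int × Int)) : List Int :=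
  (PySem.List.pyRange 1 (s.length : Int) 1).foldl (pvStepA s) (List.replicate n (0 : Int))

-- the accumulator pass used as the bridge between A's loop and B's pairwise sums
def pvStepB (acc : List Int × Int) (q : Int × Int) : List Int × Int :=
  (PySem.List.pySetD acc.1 q.1 acc.2, acc.2 + q.2)

def pvB (n : Nat) (s : List (Int × Int)) : List Int × Int :=
  s.foldl pvStepB (List.replicate n (0 : Int), (0 : Int))


lemma pvBefore_iff (p : List Int) (a b : Int) :
    pvBefore p a b = true ↔ (pvKey p a < pvKey p b ∨ (pvKey p a = pvKey p b ∧ a < b)) := by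
  simp [pvBefore]

lemma pvBefore_irrefl (p : List Int) (t : Int) : pvBefore p t t = false := by
  simp [pvBefore]

lemma pvBefore_asymm (p : List Int) (a b : Int) (h : pvBefore p a b = true) :
    pvBefore p b a = false := by
  rw [pvBefore_iff] at h
  cases heq : pvBefore p b a with
  | false => rfl
  | true => rw [pvBefore_iff] at heq; omega

lemma pv_insertBy_pairwise (p : List Int) (x : Int × Int) (ys : List (Int × Int))
    (hys : ys.Pairwise (fun a b => pvBefore p a.1 b.1 = true))
    (hidx : ∀ y ∈ ys, y.1 < x.1) :
    (PySem.List.insertBy (fun a b => decide (pvKey p a.1 < pvKey p b.1)) x ys).Pairwise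
      (fun a b => pvBefore p a.1 b.1 = true) := by
  induction ys with
  | nil => simp [PySem.List.insertBy]
  | cons y ys ih =>
    rw [List.pairwise_cons] at hys
    by_cases h : pvKey p x.1 < pvKey p y.1
    · have hins : PySem.List.insertBy (fun a b => decide (pvKey p a.1 < pvKey p b.1)) x (y :: ys)
        = x :: y :: ys := by simp [PySem.List.insertBy, h]
      rw [hins, List.pairwise_cons]
      refine ⟨?_, List.pairwise_cons.mpr hys⟩
      intro z hz
      rcases List.mem_cons.mp hz with rfl | hz
      · rw [pvBefore_iff]; omega
      · have := hys.1 z hz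
        rw [pvBefore_iff] at this ⊢
        omega
    · have hins : PySem.List.insertBy (fun a b => decide (pvKey p a.1 < pvKey p b.1)) x (y :: ys)
        = y :: PySem.List.insertBy (fun a b => decide (pvKey p a.1 < pvKey p b.1)) x ys := by
        simp [PySem.List.insertBy, h]
      rw [hins, List.pairwise_cons]
      constructor
      · intro z hz
        rcases (PySem.List.mem_insertBy _ x z ys).mp hz with rfl | hz
        · have hyx := hidx y (List.mem_cons_self)
          rw [pvBefore_iff]; omega
        · exact hys.1 z hz
      · exact ih hys.2 (fun y hy => hidx y (List.mem_cons_of_mem _ hy))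

lemma pv_foldl_insertBy_pairwise (p : List Int) (E : List (Int × Int)) :
    ∀ (acc : List (Int × Int)), E.Pairwise (fun a b => a.1 < b.1) →
    acc.Pairwise (fun a b => pvBefore p a.1 b.1 = true) →
    (∀ y ∈ acc, ∀ z ∈ E, y.1 < z.1) →
    (E.foldl (fun acc x => PySem.List.insertBy (fun a b => decide (pvKey p a.1 < pvKey p b.1)) x acc) acc).Pairwise
      (fun a b => pvBefore p a.1 b.1 = true) := by
  induction E with
  | nil => intro acc _ hacc _; simpa using hacc
  | cons x E ih =>
    intro acc hE hacc hlt
    rw [List.pairwise_cons] at hE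
    rw [List.foldl_cons]
    refine ih _ hE.2 ?_ ?_
    · exact pv_insertBy_pairwise p x acc hacc (fun y hy => hlt y hy x List.mem_cons_self)
    · intro y hy z hz
      rcases (PySem.List.mem_insertBy _ x y acc).mp hy with rfl | hy
      · exact hE.1 z hz
      · exact hlt y hy z (List.mem_cons_of_mem _ hz)

lemma pv_sorted_pairwise_lex (p : List Int) (E : List (Int × Int))
    (hE : E.Pairwise (fun a b => a.1 < b.1)) :
    (PySem.List.sorted E (fun x => pvKey p x.1) false).Pairwise
      (fun a b => pvBefore p a.1 b.1 = true) := by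
  rw [PySem.List.sorted_eq_foldl_insertBy]
  exact pv_foldl_insertBy_pairwise p E [] hE (by simp) (by simp)

lemma pv_foldl_snd (l : List (Int × Int)) : ∀ s : List Int × Int,
    (l.foldl pvStepB s).2 = s.2 + (l.map (·.2)).sum := by
  induction l with
  | nil => intro s; simp
  | cons x l ih =>
    intro s
    rw [List.foldl_cons, ih]
    simp [pvStepB]
    ring

lemma pv_foldl_len (l : List (Int × Int)) : ∀ s : List Int × Int,
    ((l.foldl pvStepB s).1).length = s.1.length := by
  induction l with
  | nil => intro s; rfl
  | cons x l ih =>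
    intro s
    rw [List.foldl_cons, ih]
    simp [pvStepB, PySem.List.length_pySetD]

lemma pv_foldl_get_ne (l : List (Int × Int)) : ∀ (s : List Int × Int) (k : Nat),
    (∀ y ∈ l, 0 ≤ y.1 ∧ y.1 ≠ (k : Int)) →
    ((l.foldl pvStepB s).1)[k]? = s.1[k]? := by
  induction l with
  | nil => intro s k _; rfl
  | cons y l ih =>
    intro s k hl
    have hy := hl y List.mem_cons_self
    rw [List.foldl_cons, ih _ k (fun z hz => hl z (List.mem_cons_of_mem _ hz))]
    show (PySem.List.pySetD s.1 y.1 s.2)[k]? = s.1[k]?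
    rw [PySem.List.pySetD_of_nonneg _ _ hy.1, List.getElem?_set_ne (by omega)]

lemma pvB_entry (n : Nat) (u : List (Int × Int)) (x : Int × Int) (v : List (Int × Int))
    (hx0 : 0 ≤ x.1) (hxn : x.1.toNat < n)
    (hv : ∀ y ∈ v, 0 ≤ y.1 ∧ y.1 ≠ x.1) :
    ((pvB n (u ++ x :: v)).1)[x.1.toNat]? = some ((u.map (·.2)).sum) := by
  unfold pvB
  rw [List.foldl_append, List.foldl_cons, pv_foldl_get_ne v _ _ (fun y hy => ⟨(hv y hy).1, by have := (hv y hy).2; omega⟩)]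
  have hlen : ((u.foldl pvStepB (List.replicate n (0 : Int), (0 : Int))).1).length = n := by
    rw [pv_foldl_len]; simp
  show (PySem.List.pySetD _ x.1 _)[x.1.toNat]? = _
  rw [PySem.List.pySetD_of_nonneg _ _ hx0,
    List.getElem?_set_self (by rw [hlen]; exact hxn), pv_foldl_snd]
  simp

lemma pv_filter_prefix (p : List Int) (u : List (Int × Int)) (x : Int × Int)
    (v : List (Int × Int))
    (hpw : (u ++ x :: v).Pairwise (fun a b => pvBefore p a.1 b.1 = true)) :
    (u ++ x :: v).filter (fun y => pvBefore p y.1 x.1) = u := by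
  rw [List.pairwise_append] at hpw
  obtain ⟨hu, hxv, hcross⟩ := hpw
  rw [List.filter_append, List.filter_cons]
  have h1 : u.filter (fun y => pvBefore p y.1 x.1) = u :=
    List.filter_eq_self.mpr (fun a ha => hcross a ha x List.mem_cons_self)
  have h2 : v.filter (fun y => pvBefore p y.1 x.1) = [] :=
    List.filter_eq_nil_iff.mpr (fun a ha => by
      have := pvBefore_asymm p x.1 a.1 (List.rel_of_pairwise_cons hxv ha)
      simp [this])
  rw [h1, h2, pvBefore_irrefl]
  simp

lemma pv_pyGet?_append_left {α : Type} (t u : List α) (i : Int) (h0 : 0 ≤ i)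
    (h : i < (t.length : Int)) :
    PySem.List.pyGet? (t ++ u) i = PySem.List.pyGet? t i := by
  rw [PySem.List.pyGet?_of_nonneg _ h0, PySem.List.pyGet?_of_nonneg _ h0,
    List.getElem?_append_left]
  omega

-- A's read-back loop equals the accumulator pass pvB (with the running total
-- characterised at the last element, which the induction needs)
lemma pv_loop_equiv (n : Nat) (s : List (Int × Int))
    (hs : ∀ p ∈ s, 0 ≤ p.1 ∧ p.1 < (n : Int)) :
    pvA n s = (pvB n s).1 ∧ (pvA n s).length = n ∧
    ∀ t q, s = t ++ [q] →
      (PySem.List.pyGet? (pvA n s) q.1).getD 0 = (pvB n s).2 - q.2 := by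
  induction s using List.reverseRecOn with
  | nil =>
    refine ⟨?_, ?_, ?_⟩
    · simp [pvA, pvB, PySem.List.pyRange_one_eq_nil]
    · simp [pvA, PySem.List.pyRange_one_eq_nil]
    · intro t q h; simp at h
  | append_singleton t q ih =>
    have hq : 0 ≤ q.1 ∧ q.1 < (n : Int) := hs q (by simp)
    have hqn : q.1.toNat < n := by omega
    have hst : ∀ p ∈ t, 0 ≤ p.1 ∧ p.1 < (n : Int) := fun p hp => hs p (by simp [hp])
    have ih' := ih hst
    rcases eq_or_ne t [] with rfl | ht
    · -- single element: A's loop is empty, B writes 0 in place of the existing 0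
      simp only [List.nil_append] at *
      have h1 : pvA n [q] = List.replicate n (0 : Int) := by
        simp [pvA, PySem.List.pyRange_one_eq_nil]
      have h2 : pvB n [q] = (PySem.List.pySetD (List.replicate n (0 : Int)) q.1 0, q.2) := by
        simp [pvB, pvStepB]
      refine ⟨?_, ?_, ?_⟩
      · rw [h1, h2, PySem.List.pySetD_of_nonneg _ _ hq.1, List.set_replicate_self]
      · simp [h1]
      · intro t' q' h
        rcases t' with _ | ⟨a, l⟩
        · simp only [List.nil_append, List.cons.injEq, and_true] at h
          subst h
          rw [h1, h2, PySem.List.pyGet?_of_nonneg _ hq.1]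
          simp [hqn]
        · exfalso; simp at h
    · -- t nonempty: peel the last loop iteration
      have hm : 1 ≤ t.length := List.length_pos_iff.mpr ht
      have hlast := List.dropLast_append_getLast ht
      set L := t.getLast ht with hL
      have hsplit : PySem.List.pyRange 1 (((t ++ [q]).length : Int)) 1
          = PySem.List.pyRange 1 (t.length : Int) 1 ++ [(t.length : Int)] := by
        have : (((t ++ [q]).length : Int)) = (t.length : Int) + 1 := by simp
        rw [this, PySem.List.pyRange_one_succ_right (by exact_mod_cast hm)]
      have hcongr : (PySem.List.pyRange 1 (t.length : Int) 1).foldl (pvStepA (t ++ [q]))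
            (List.replicate n (0 : Int)) = pvA n t := by
        unfold pvA
        refine PySem.List.foldl_congr_mem _ _ _ _ ?_
        intro acc i hi
        have hib := PySem.List.mem_pyRange_one.mp hi
        unfold pvStepA
        rw [pv_pyGet?_append_left t [q] i (by omega) (by omega),
          pv_pyGet?_append_left t [q] (i - 1) (by omega) (by omega)]
      have hAq : pvA n (t ++ [q]) = pvStepA (t ++ [q]) (pvA n t) (t.length : Int) := by
        conv_lhs => rw [pvA]
        rw [hsplit, List.foldl_append, hcongr]
        simp only [List.foldl_cons, List.foldl_nil]
      have hget_q : PySem.List.pyGet? (t ++ [q]) (t.length : Int) = some q :=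
        PySem.List.pyGet?_append_length t [] q
      have hget_prev : PySem.List.pyGet? (t ++ [q]) ((t.length : Int) - 1) = some L := by
        rw [pv_pyGet?_append_left t [q] _ (by omega) (by omega),
          PySem.List.pyGet?_of_nonneg _ (by omega)]
        have h1 : ((t.length : Int) - 1).toNat = t.length - 1 := by omega
        rw [h1, List.getElem?_eq_getElem (by omega)]
        rw [hL, List.getLast_eq_getElem]
      have hread : (PySem.List.pyGet? (pvA n t) L.1).getD 0 = (pvB n t).2 - L.2 :=
        ih'.2.2 t.dropLast L hlast.symm
      have hAval : pvA n (t ++ [q])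
          = PySem.List.pySetD (pvA n t) q.1 ((pvB n t).2 - L.2 + L.2) := by
        rw [hAq]; unfold pvStepA
        rw [hget_q, hget_prev]
        simp only [Option.getD_some]
        rw [hread]
      have hBval : pvB n (t ++ [q])
          = (PySem.List.pySetD (pvB n t).1 q.1 (pvB n t).2, (pvB n t).2 + q.2) := by
        unfold pvB
        rw [List.foldl_append]
        simp [pvStepB]
      refine ⟨?_, ?_, ?_⟩
      · rw [hAval, hBval, ih'.1]; ring_nf
      · rw [hAval, PySem.List.length_pySetD, ih'.2.1]
      · intro t' q' h
        have h' := List.append_inj' h.symm rfl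
        have hq' : q' = q := by simpa using h'.2
        rw [hq', hAval, hBval]
        rw [PySem.List.pySetD_of_nonneg _ _ hq.1, PySem.List.pyGet?_of_nonneg _ hq.1,
          List.getElem?_set_self (by rw [ih'.2.1]; exact hqn)]
        simp only [Option.getD_some]; ring

-- ===== VERDICT (by name: the statement is the Claim_ definition above) =====
theorem calculate_waiting_times_spec : Claim_equal_calculate_waiting_times := by
  intro d p _ hpre
  unfold Pre_calculate_waiting_times at hpre
  unfold Spec_calculate_waiting_times
  have hE : ∀ x ∈ PySem.List.enumerate d 0, 0 ≤ x.1 ∧ x.1 < (d.length : Int) := by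
    intro x hx
    rcases (PySem.List.mem_enumerate_iff d 0 x).mp hx with ⟨k, hk, rfl⟩
    exact ⟨by simp, by simp; omega⟩
  have hL : ∀ x ∈ PySem.List.sorted (PySem.List.enumerate d 0)
      (fun x => pvKey p x.1) false, 0 ≤ x.1 ∧ x.1 < (d.length : Int) := by
    intro x hx
    exact hE x ((PySem.List.mem_sorted _ _ _ _).mp hx)
  have hA : calculate_waiting_times d p
      = pvA d.length (PySem.List.sorted (PySem.List.enumerate d 0) (fun x => pvKey p x.1) false) := rfl
  have hpw := pv_sorted_pairwise_lex p (PySem.List.enumerate d 0) (PySem.List.pairwise_lt_enumerate d 0)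
  have hperm := PySem.List.sorted_perm (PySem.List.enumerate d 0) (fun x => pvKey p x.1) false
  rw [hA, (pv_loop_equiv d.length _ hL).1]
  -- goal: (pvB n L).1 = calculate_waiting_times_alt d p
  apply List.ext_getElem?
  intro k
  have hlenA : ((pvB d.length (PySem.List.sorted (PySem.List.enumerate d 0)
      (fun x => pvKey p x.1) false)).1).length = d.length := by
    unfold pvB; rw [pv_foldl_len]; simp
  have hBdef : calculate_waiting_times_alt d p
      = (PySem.List.pyRange 0 (d.length : Int) 1).map (fun i =>
          (((PySem.List.enumerate d 0).filter (fun y => pvBefore p y.1 i)).map (·.2)).sum) := by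
    show ((PySem.List.pyRange 0 (d.length : Int) 1).map _) = _
    apply List.map_congr_left
    intro i hi
    have hib := PySem.List.mem_pyRange_one.mp hi
    have hik : i = ((i.toNat : Nat) : Int) := by omega
    have hikn : i.toNat < d.length := by omega
    congr 2
    apply List.filter_congr
    intro jd hjd
    rcases (PySem.List.mem_enumerate_iff d 0 jd).mp hjd with ⟨j, hj, rfl⟩
    simp only [zero_add]
    rw [hik, PySem.List.pyGetD_map_pyRange _ _ j _ hj,
      PySem.List.pyGetD_map_pyRange _ _ i.toNat _ hikn]
    rfl
  by_cases hk : k < d.length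
  · -- element (k, d[k]) sits somewhere in the sorted list
    have hmem : ((k : Int), d[k]) ∈ PySem.List.sorted (PySem.List.enumerate d 0)
        (fun x => pvKey p x.1) false := by
      rw [PySem.List.mem_sorted, PySem.List.mem_enumerate_iff]
      exact ⟨k, hk, by simp⟩
    obtain ⟨u, v, huv⟩ := List.append_of_mem hmem
    have hpw' := huv ▸ hpw
    have hLmem := huv ▸ hL
    have hv : ∀ y ∈ v, 0 ≤ y.1 ∧ y.1 ≠ ((k : Int), d[k]).1 := by
      intro y hy
      refine ⟨(hLmem y (by simp [hy])).1, ?_⟩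
      intro hcontra
      have hxy := List.rel_of_pairwise_cons ((List.pairwise_append.mp hpw').2.1) hy
      rw [hcontra] at hxy
      rw [pvBefore_irrefl] at hxy
      exact Bool.false_ne_true hxy
    -- LHS entry
    have hlhs : ((pvB d.length (PySem.List.sorted (PySem.List.enumerate d 0)
        (fun x => pvKey p x.1) false)).1)[k]?
        = some ((u.map (·.2)).sum) := by
      rw [huv]
      have := pvB_entry d.length u ((k : Int), d[k]) v (by simp) (by simpa using hk) hv
      simpa using this
    -- the prefix u is exactly the filter of the sorted list, hence of enumerate
    have hufilter : ((u ++ ((k : Int), d[k]) :: v).filter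
        (fun y => pvBefore p y.1 (k : Int))) = u :=
      pv_filter_prefix p u ((k : Int), d[k]) v hpw'
    have hsum : (u.map (·.2)).sum
        = (((PySem.List.enumerate d 0).filter (fun y => pvBefore p y.1 (k : Int))).map (·.2)).sum := by
      rw [← hufilter]
      exact (List.Perm.map (·.2) (List.Perm.filter _ (huv ▸ hperm))).sum_eq
    -- RHS entry
    have hrhs : (calculate_waiting_times_alt d p)[k]?
        = some ((((PySem.List.enumerate d 0).filter (fun y => pvBefore p y.1 (k : Int))).map (·.2)).sum) := by
      rw [hBdef, PySem.List.pyRange_zero_natCast, List.map_map, List.getElem?_map,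
        List.getElem?_range hk]
      rfl
    rw [hlhs, hrhs, hsum]
  · rw [List.getElem?_eq_none, List.getElem?_eq_none]
    · rw [hBdef, PySem.List.pyRange_zero_natCast]; simp; omega
    · rw [hlenA]; omega
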